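-- pv_equiv track=rewrite | github.com/sidneiali/base_django | panel/groups/forms.py | traduz_permissao
-- ===== SOURCE A (Python) =====
-- MODEL_NAME_TRANSLATIONS = {
--     "group": "Grupo",
--     "user": "Usuário",
--     "permission": "Permissão",
--     "module": "Módulo",
-- }
--
-- def traduz_permissao(name: str) -> str:
--     """Traduz descricoes padrao de permissoes do Django para pt-BR."""
--
--     text = (
--         name.replace("Can add", "Pode adicionar")
--         .replace("Can change", "Pode alterar")
--         .replace("Can delete", "Pode excluir")
--         .replace("Can view", "Pode visualizar")
--     )
--
--     for source, target in MODEL_NAME_TRANSLATIONS.items():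
--         text = text.replace(source, target.lower())
--
--     return text
-- ===== SOURCE B (Python) =====
-- TRANSLATIONS = [
--     ("Can add", "Pode adicionar"),
--     ("Can change", "Pode alterar"),
--     ("Can delete", "Pode excluir"),
--     ("Can view", "Pode visualizar"),
--     ("group", "grupo"),
--     ("user", "usu\u00e1rio"),
--     ("permission", "permiss\u00e3o"),
--     ("module", "m\u00f3dulo"),
-- ]
--
-- def traduz_permissao(name: str) -> str:
--     """Traduz descricoes padrao de permissoes do Django para pt-BR."""
--     out = []
--     i = 0
--     n = len(name)
--     while i < n:
--         for source, target in TRANSLATIONS: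
--             if name.startswith(source, i):
--                 out.append(target)
--                 i += len(source)
--                 break
--         else:
--             out.append(name[i])
--             i += 1
--     return "".join(out)
-- ===== Notes on version B (the rewrite author's own statement) =====
-- stated objective: alternative
-- what changed: B makes a single left-to-right scan over the string with one (source, target) translation table, emitting the translation at each match position, instead of A's eight sequential full-string .replace passes.
import Mathlib
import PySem

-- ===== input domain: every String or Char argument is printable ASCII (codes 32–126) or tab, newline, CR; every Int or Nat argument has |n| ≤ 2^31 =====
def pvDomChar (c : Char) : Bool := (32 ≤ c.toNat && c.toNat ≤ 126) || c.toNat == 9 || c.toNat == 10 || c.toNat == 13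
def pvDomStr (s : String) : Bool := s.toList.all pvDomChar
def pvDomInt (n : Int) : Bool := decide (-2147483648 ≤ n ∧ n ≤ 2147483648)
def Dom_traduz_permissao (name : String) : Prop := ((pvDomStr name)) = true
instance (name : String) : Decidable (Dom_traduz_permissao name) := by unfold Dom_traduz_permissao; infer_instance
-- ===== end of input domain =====

-- B replaces A's eight sequential full-string .replace passes by a single left-to-right scan
-- over a translation table (alternative decomposition, not claimed faster).

-- ===== PORT A =====
def MODEL_NAME_TRANSLATIONS : PySem.Dict String String :=
  PySem.Dict.ofList [("group", "Grupo"), ("user", "Usuário"), ("permission", "Permissão"), ("module", "Módulo")]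

def traduz_permissao (name : String) : String :=
  let text :=
    PySem.Str.replace
      (PySem.Str.replace
        (PySem.Str.replace
          (PySem.Str.replace name "Can add" "Pode adicionar")
          "Can change" "Pode alterar")
        "Can delete" "Pode excluir")
      "Can view" "Pode visualizar"
  MODEL_NAME_TRANSLATIONS.items.foldl
    (fun text p => PySem.Str.replace text p.1 (PySem.Str.lower p.2)) text

-- ===== PORT B =====
-- Source B's translation table (source, target), in Source B's order.
def bPairs : List (List Char × List Char) :=
  [("Can add".toList, "Pode adicionar".toList),
   ("Can change".toList, "Pode alterar".toList),
   ("Can delete".toList, "Pode excluir".toList),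
   ("Can view".toList, "Pode visualizar".toList),
   ("group".toList, "grupo".toList),
   ("user".toList, "usuário".toList),
   ("permission".toList, "permissão".toList),
   ("module".toList, "módulo".toList)]

-- Source B's single while-loop: at each position try the table entries in order
-- (name.startswith(source, i) = the source is a prefix of the rest of the input),
-- emit the target and skip the source on a hit, else copy one character.
def altScan (ks : List (List Char × List Char)) : List Char → List Char
  | [] => []
  | c :: t =>
    match ks.find? (fun kv => kv.1.isPrefixOf (c :: t)) with
    | some kv => kv.2 ++ altScan ks (List.drop (kv.1.length - 1) t)
    | none => c :: altScan ks t
termination_by s => s.length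
decreasing_by all_goals (simp; try omega)

def traduz_permissao_alt (name : String) : String :=
  String.ofList (altScan bPairs name.toList)

-- ===== PRECONDITION & SPEC =====
def Spec_traduz_permissao (name : String) (out : String) : Prop := out = traduz_permissao_alt name
instance (name : String) (out : String) : Decidable (Spec_traduz_permissao name out) := by unfold Spec_traduz_permissao; infer_instance

-- ===== CLAIM (what is proved, stated in full; the proofs are below) =====
def Claim_equal_traduz_permissao : Prop := ∀ (name : String), Dom_traduz_permissao name → Spec_traduz_permissao name (traduz_permissao name)

-- ===== LEMMAS AND PROOFS =====

-- Python's str.replace old→new (old ≠ ""), written as the left-to-right structural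
-- recursion both ports are related to.
def pyReplace (o n : List Char) : List Char → List Char
  | [] => []
  | c :: t =>
    if o.isPrefixOf (c :: t) then n ++ pyReplace o n (List.drop (o.length - 1) t)
    else c :: pyReplace o n t
termination_by s => s.length
decreasing_by all_goals (simp; try omega)

-- unfolding helpers
theorem pyReplace_cons_pos {o : List Char} (n : List Char) {c : Char} {t : List Char}
    (h : o.isPrefixOf (c :: t) = true) :
    pyReplace o n (c :: t) = n ++ pyReplace o n (List.drop (o.length - 1) t) := by
  rw [pyReplace, if_pos h]

theorem pyReplace_cons_neg {o : List Char} (n : List Char) {c : Char} {t : List Char}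
    (h : ¬ o <+: (c :: t)) :
    pyReplace o n (c :: t) = c :: pyReplace o n t := by
  rw [pyReplace, if_neg]
  simpa [List.isPrefixOf_iff_prefix] using h

theorem altScan_cons_some {ks : List (List Char × List Char)} {c : Char} {t : List Char}
    {kv : List Char × List Char}
    (h : ks.find? (fun kv => kv.1.isPrefixOf (c :: t)) = some kv) :
    altScan ks (c :: t) = kv.2 ++ altScan ks (List.drop (kv.1.length - 1) t) := by
  rw [altScan, h]

theorem altScan_cons_none {ks : List (List Char × List Char)} {c : Char} {t : List Char}
    (h : ks.find? (fun kv => kv.1.isPrefixOf (c :: t)) = none) :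
    altScan ks (c :: t) = c :: altScan ks t := by
  rw [altScan, h]

theorem go_acc (o n : List Char) :
    ∀ (fuel : Nat) (l acc : List Char),
      PySem.Chars.replace.go o n fuel l acc = acc.reverse ++ PySem.Chars.replace.go o n fuel l [] := by
  intro fuel
  induction fuel with
  | zero => intro l acc; simp [PySem.Chars.replace.go]
  | succ f ih =>
    intro l acc
    cases l with
    | nil => simp [PySem.Chars.replace.go]
    | cons c t =>
      simp only [PySem.Chars.replace.go]
      split
      · rw [ih _ (n.reverse ++ acc), ih _ (n.reverse ++ [])]
        simp
      · rw [ih _ (c :: acc), ih _ (c :: [])]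
        simp

theorem go_eq_pyReplace (o n : List Char) (ho : o ≠ []) :
    ∀ (fuel : Nat) (l : List Char), l.length ≤ fuel →
      PySem.Chars.replace.go o n fuel l [] = pyReplace o n l := by
  intro fuel
  have holen : 1 ≤ o.length := by cases o <;> simp_all
  induction fuel with
  | zero =>
    intro l hl
    have : l = [] := by cases l <;> simp_all
    subst this
    simp [PySem.Chars.replace.go, pyReplace]
  | succ f ih =>
    intro l hl
    cases l with
    | nil => simp [PySem.Chars.replace.go, pyReplace]
    | cons c t =>
      simp only [PySem.Chars.replace.go]
      split
      · rename_i hpre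
        rw [go_acc, ih (List.drop o.length (c :: t)) (by simp only [List.length_drop, List.length_cons] at *; omega)]
        rw [pyReplace_cons_pos n hpre]
        have : List.drop o.length (c :: t) = List.drop (o.length - 1) t := by
          obtain ⟨m, hm⟩ := Nat.exists_eq_add_of_le holen
          rw [hm]
          simp [Nat.add_comm]
        rw [this]
        simp
      · rename_i hpre
        rw [go_acc, ih t (by simpa using Nat.le_of_succ_le_succ hl)]
        rw [pyReplace_cons_neg n (by simpa [List.isPrefixOf_iff_prefix] using hpre)]
        simp

theorem replace_eq_pyReplace (o n s : List Char) (ho : o ≠ []) :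
    PySem.Chars.replace s o n = pyReplace o n s := by
  have hemp : o.isEmpty = false := by cases o <;> simp_all
  rw [PySem.Chars.replace, hemp]
  simp only [Bool.false_eq_true, if_false]
  exact go_eq_pyReplace o n ho s.length s le_rfl

theorem prefix_append_or {k u x : List Char} (h : k <+: u ++ x) : k <+: u ∨ u <+: k := by
  rcases h with ⟨r, hr⟩
  rcases List.append_eq_append_iff.mp hr.symm with ⟨a, ha1, _⟩ | ⟨c, hc1, _⟩
  · exact Or.inr ⟨a, ha1.symm⟩
  · exact Or.inl ⟨c, hc1.symm⟩

theorem not_prefix_append {k u : List Char} (x : List Char)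
    (h1 : ¬ k <+: u) (h2 : ¬ u <+: k) : ¬ k <+: u ++ x := by
  intro h; rcases prefix_append_or h with h | h
  · exact h1 h
  · exact h2 h

theorem tails_of_tail {w0 : List Char} {c : Char} {w : List Char}
    (h : (c :: w) ∈ w0.tails) : w ∈ w0.tails := by
  rw [List.mem_tails] at h ⊢
  exact (List.suffix_cons c w).trans h

theorem tails_mono_cons {u : List Char} {c : Char} {w : List Char}
    (h : w ∈ u.tails) : w ∈ (c :: u).tails := by
  rw [List.mem_tails] at h ⊢
  exact h.trans (List.suffix_cons c u)

theorem pyReplace_append (o n : List Char) :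
    ∀ (u : List Char), (∀ w ∈ u.tails, w ≠ [] → ¬ o <+: w ∧ ¬ w <+: o) →
    ∀ x, pyReplace o n (u ++ x) = u ++ pyReplace o n x := by
  intro u
  induction u with
  | nil => intro _ x; simp
  | cons c u' ihu =>
    intro h x
    have hcu := h (c :: u') (by simp [List.mem_tails]) (by simp)
    have hnp : ¬ o <+: (c :: (u' ++ x)) := by
      simpa using not_prefix_append x hcu.1 hcu.2
    rw [List.cons_append, pyReplace_cons_neg n hnp]
    rw [ihu (fun w hw hne => h w (tails_mono_cons hw) hne) x]
    simp

theorem scan_append (ks : List (List Char × List Char)) :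
    ∀ (u : List Char), (∀ w ∈ u.tails, w ≠ [] → ∀ kv ∈ ks, ¬ kv.1 <+: w ∧ ¬ w <+: kv.1) →
    ∀ x, altScan ks (u ++ x) = u ++ altScan ks x := by
  intro u
  induction u with
  | nil => intro _ x; simp
  | cons c u' ihu =>
    intro h x
    have hfind : ks.find? (fun kv => kv.1.isPrefixOf (c :: (u' ++ x))) = none := by
      rw [List.find?_eq_none]
      intro kv hkv
      have hcu := h (c :: u') (by simp [List.mem_tails]) (by simp) kv hkv
      have := not_prefix_append x hcu.1 hcu.2
      simpa [List.isPrefixOf_iff_prefix] using this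
    rw [List.cons_append, altScan_cons_none hfind]
    rw [ihu (fun w hw hne => h w (tails_mono_cons hw) hne) x]
    simp

theorem scan_safe (ks : List (List Char × List Char)) (w0 : List Char)
    (H : ∀ w ∈ w0.tails, w ≠ [] → ∀ kv ∈ ks, ¬ w <+: kv.2 ∧ ¬ kv.2 <+: w) :
    ∀ (t w : List Char), w ∈ w0.tails → w ≠ [] → ¬ w <+: t → ¬ w <+: altScan ks t := by
  intro t
  induction t with
  | nil =>
    intro w hw hne hpre
    simpa [altScan] using fun h => hne (List.prefix_nil.mp h)
  | cons c t' iht =>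
    intro w hw hne hpre
    cases hfind : ks.find? (fun kv => kv.1.isPrefixOf (c :: t')) with
    | some kv =>
      rw [altScan_cons_some hfind]
      intro hcontra
      have hmem := List.mem_of_find?_eq_some hfind
      rcases prefix_append_or hcontra with h | h
      · exact (H w hw hne kv hmem).1 h
      · exact (H w hw hne kv hmem).2 h
    | none =>
      rw [altScan_cons_none hfind]
      intro hcontra
      cases w with
      | nil => exact hne rfl
      | cons e w' =>
        rw [List.cons_prefix_cons] at hcontra
        obtain ⟨rfl, hw'⟩ := hcontra
        cases hw'e : decide (w' = []) with
        | true =>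
          have : w' = [] := by simpa using hw'e
          subst this
          exact hpre (by simp)
        | false =>
          have hw'ne : w' ≠ [] := by simpa using hw'e
          have hnp : ¬ w' <+: t' := fun hp => hpre (List.cons_prefix_cons.mpr ⟨rfl, hp⟩)
          exact iht w' (tails_of_tail hw) hw'ne hnp hw'

theorem scan_nil : ∀ s, altScan [] s = s := by
  intro s
  induction s with
  | nil => simp [altScan]
  | cons c t ih => rw [altScan_cons_none (by simp)]; rw [ih]

theorem stage (ks : List (List Char × List Char)) (k v : List Char) (hk : k ≠ [])
    (H2 : ∀ w ∈ k.tails, w ≠ [] → ∀ kv ∈ ks, ¬ kv.1 <+: w ∧ ¬ w <+: kv.1)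
    (H3 : ∀ kv ∈ ks, ∀ w ∈ kv.2.tails, w ≠ [] → ¬ k <+: w ∧ ¬ w <+: k)
    (H4 : ∀ w ∈ k.tails, w ≠ [] → ∀ kv ∈ ks, ¬ w <+: kv.2 ∧ ¬ kv.2 <+: w) :
    ∀ s, pyReplace k v (altScan ks s) = altScan (ks ++ [(k, v)]) s := by
  intro s
  induction hL : s.length using Nat.strong_induction_on generalizing s with
  | _ N ih =>
    cases s with
    | nil => simp [altScan, pyReplace]
    | cons c t =>
      cases hfind : ks.find? (fun kv => kv.1.isPrefixOf (c :: t)) with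
      | some kv0 =>
        have hmem := List.mem_of_find?_eq_some hfind
        have hfind' : (ks ++ [(k, v)]).find? (fun kv => kv.1.isPrefixOf (c :: t)) = some kv0 := by
          rw [List.find?_append, hfind]; rfl
        rw [altScan_cons_some hfind, altScan_cons_some hfind']
        rw [pyReplace_append k v kv0.2 (fun w hw hne => H3 kv0 hmem w hw hne)]
        rw [ih (List.drop (kv0.1.length - 1) t).length (by subst hL; simp only [List.length_drop, List.length_cons]; omega) _ rfl]
      | none =>
        cases hkpre : k.isPrefixOf (c :: t) with
        | true =>
          obtain ⟨t', ht'⟩ := (List.isPrefixOf_iff_prefix.mp hkpre)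
          have hfind' : (ks ++ [(k, v)]).find? (fun kv => kv.1.isPrefixOf (c :: t)) = some (k, v) := by
            rw [List.find?_append, hfind]
            simp [List.find?, hkpre]
          rw [altScan_cons_some hfind']
          cases k with
          | nil => exact absurd rfl hk
          | cons d k0 =>
            rw [List.cons_append] at ht'
            injection ht' with hcd hteq
            subst hcd
            subst hteq
            have hscan : altScan ks (d :: (k0 ++ t')) = d :: (k0 ++ altScan ks t') := by
              have := scan_append ks (d :: k0) H2 t'
              simpa using this
            rw [hscan]
            have hpp : (d :: k0).isPrefixOf (d :: (k0 ++ altScan ks t')) = true := by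
              simp [List.isPrefixOf_iff_prefix]
            rw [pyReplace_cons_pos v hpp]
            simp only [List.length_cons, Nat.add_sub_cancel, List.drop_left]
            rw [ih t'.length (by simp only [List.length_cons, List.length_append] at hL; omega) t' rfl]
        | false =>
          have hknp : ¬ k <+: (c :: t) := by
            rw [← List.isPrefixOf_iff_prefix, hkpre]
            simp
          have hfind' : (ks ++ [(k, v)]).find? (fun kv => kv.1.isPrefixOf (c :: t)) = none := by
            rw [List.find?_append, hfind]
            simp [List.find?, hkpre]
          rw [altScan_cons_none hfind, altScan_cons_none hfind']
          have hsafe : ¬ k <+: (c :: altScan ks t) := by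
            cases k with
            | nil => exact absurd rfl hk
            | cons e k'' =>
              intro hcontra
              rw [List.cons_prefix_cons] at hcontra
              obtain ⟨rfl, hk''⟩ := hcontra
              cases hk''e : decide (k'' = []) with
              | true =>
                have : k'' = [] := by simpa using hk''e
                subst this
                exact hknp (by simp)
              | false =>
                have hne : k'' ≠ [] := by simpa using hk''e
                have hnp : ¬ k'' <+: t := fun hp => hknp (List.cons_prefix_cons.mpr ⟨rfl, hp⟩)
                exact scan_safe ks (e :: k'') H4 t k''
                  (by rw [List.mem_tails]; exact List.suffix_cons e k'') hne hnp hk''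
          rw [pyReplace_cons_neg v hsafe]
          rw [ih t.length (by subst hL; simp) t rfl]

-- the eight sequential replace passes, staged into the one-pass scan
theorem chain_eq (s : List Char) :
    pyReplace "module".toList "módulo".toList
      (pyReplace "permission".toList "permissão".toList
        (pyReplace "user".toList "usuário".toList
          (pyReplace "group".toList "grupo".toList
            (pyReplace "Can view".toList "Pode visualizar".toList
              (pyReplace "Can delete".toList "Pode excluir".toList
                (pyReplace "Can change".toList "Pode alterar".toList
                  (pyReplace "Can add".toList "Pode adicionar".toList s))))))) = altScan bPairs s := by
  have e0 : pyReplace "Can add".toList "Pode adicionar".toList s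
      = altScan [("Can add".toList, "Pode adicionar".toList)] s := by
    have h := stage [] "Can add".toList "Pode adicionar".toList (by decide)
      (by decide) (by decide) (by decide) s
    rw [scan_nil] at h
    simpa using h
  rw [e0]
  rw [stage [("Can add".toList, "Pode adicionar".toList)]
    "Can change".toList "Pode alterar".toList (by decide) (by decide) (by decide) (by decide) s]
  simp only [List.cons_append, List.nil_append]
  rw [stage [("Can add".toList, "Pode adicionar".toList),
    ("Can change".toList, "Pode alterar".toList)]
    "Can delete".toList "Pode excluir".toList (by decide) (by decide) (by decide) (by decide) s]
  simp only [List.cons_append, List.nil_append]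
  rw [stage [("Can add".toList, "Pode adicionar".toList),
    ("Can change".toList, "Pode alterar".toList),
    ("Can delete".toList, "Pode excluir".toList)]
    "Can view".toList "Pode visualizar".toList (by decide) (by decide) (by decide) (by decide) s]
  simp only [List.cons_append, List.nil_append]
  rw [stage [("Can add".toList, "Pode adicionar".toList),
    ("Can change".toList, "Pode alterar".toList),
    ("Can delete".toList, "Pode excluir".toList),
    ("Can view".toList, "Pode visualizar".toList)]
    "group".toList "grupo".toList (by decide) (by decide) (by decide) (by decide) s]
  simp only [List.cons_append, List.nil_append]
  rw [stage [("Can add".toList, "Pode adicionar".toList),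
    ("Can change".toList, "Pode alterar".toList),
    ("Can delete".toList, "Pode excluir".toList),
    ("Can view".toList, "Pode visualizar".toList),
    ("group".toList, "grupo".toList)]
    "user".toList "usuário".toList (by decide) (by decide) (by decide) (by decide) s]
  simp only [List.cons_append, List.nil_append]
  rw [stage [("Can add".toList, "Pode adicionar".toList),
    ("Can change".toList, "Pode alterar".toList),
    ("Can delete".toList, "Pode excluir".toList),
    ("Can view".toList, "Pode visualizar".toList),
    ("group".toList, "grupo".toList),
    ("user".toList, "usuário".toList)]
    "permission".toList "permissão".toList (by decide) (by decide) (by decide) (by decide) s]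
  simp only [List.cons_append, List.nil_append]
  rw [stage [("Can add".toList, "Pode adicionar".toList),
    ("Can change".toList, "Pode alterar".toList),
    ("Can delete".toList, "Pode excluir".toList),
    ("Can view".toList, "Pode visualizar".toList),
    ("group".toList, "grupo".toList),
    ("user".toList, "usuário".toList),
    ("permission".toList, "permissão".toList)]
    "module".toList "módulo".toList (by decide) (by decide) (by decide) (by decide) s]
  simp only [List.cons_append, List.nil_append]
  rfl

-- ===== VERDICT (by name: the statement is the Claim_ definition above) =====
theorem traduz_permissao_spec : Claim_equal_traduz_permissao := by
  intro name _
  unfold Spec_traduz_permissao traduz_permissao traduz_permissao_alt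
  have hitems : MODEL_NAME_TRANSLATIONS.items
      = [("group", "Grupo"), ("user", "Usuário"), ("permission", "Permissão"), ("module", "Módulo")] := by
    decide
  rw [hitems]
  simp only [List.foldl_cons, List.foldl_nil]
  have hl1 : PySem.Str.lower "Grupo" = "grupo" := by decide
  have hl2 : PySem.Str.lower "Usuário" = "usuário" := by decide
  have hl3 : PySem.Str.lower "Permissão" = "permissão" := by decide
  have hl4 : PySem.Str.lower "Módulo" = "módulo" := by decide
  rw [hl1, hl2, hl3, hl4]
  refine String.toList_inj.mp ?_
  rw [String.toList_ofList]
  simp only [PySem.Str.toList_replace]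
  rw [replace_eq_pyReplace "module".toList _ _ (by decide)]
  rw [replace_eq_pyReplace "permission".toList _ _ (by decide)]
  rw [replace_eq_pyReplace "user".toList _ _ (by decide)]
  rw [replace_eq_pyReplace "group".toList _ _ (by decide)]
  rw [replace_eq_pyReplace "Can view".toList _ _ (by decide)]
  rw [replace_eq_pyReplace "Can delete".toList _ _ (by decide)]
  rw [replace_eq_pyReplace "Can change".toList _ _ (by decide)]
  rw [replace_eq_pyReplace "Can add".toList _ _ (by decide)]
  exact chain_eq name.toList
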